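-- pv_equiv track=rewrite | github.com/ShobhitMaste/xai-project | colab_pack/backend/model/emotion_aux.py | _derive_emotion_label
-- ===== SOURCE A (Python) =====
-- _EMOTION_LEXICON = {
--     "anxiety": {"anxiety", "anxious", "panic", "nervous", "worried", "fear"},
--     "burnout": {"burnout", "burned", "exhausted", "drained", "fatigued", "tired"},
--     "pressure": {"deadline", "deadlines", "pressure", "burden", "responsibility"},
--     "distress": {"helpless", "hopeless", "trapped", "breakdown", "overwhelmed", "stuck"},
-- }
--
-- def _derive_emotion_label(text: str) -> str:
--     words = [w.strip(".,!?;:\"'()[]{}").lower() for w in text.split()]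
--     words = [w for w in words if w]
--     if not words:
--         return "none"
--
--     counts = {k: 0 for k in _EMOTION_LEXICON.keys()}
--     for w in words:
--         for emotion, lex in _EMOTION_LEXICON.items():
--             if w in lex:
--                 counts[emotion] += 1
--     if sum(counts.values()) == 0:
--         return "none"
--     return max(counts.items(), key=lambda x: x[1])[0]
-- ===== SOURCE B (Python) =====
-- _EMOTION_LEXICON = {
--     "anxiety": {"anxiety", "anxious", "panic", "nervous", "worried", "fear"},
--     "burnout": {"burnout", "burned", "exhausted", "drained", "fatigued", "tired"},
--     "pressure": {"deadline", "deadlines", "pressure", "burden", "responsibility"},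
--     "distress": {"helpless", "hopeless", "trapped", "breakdown", "overwhelmed", "stuck"},
-- }
--
-- # Inverted index: one dict lookup per word instead of a scan over all four lexica.
-- _WORD_TO_EMOTION = {w: e for e, lex in _EMOTION_LEXICON.items() for w in lex}
--
-- def _derive_emotion_label(text: str) -> str:
--     counts = {e: 0 for e in _EMOTION_LEXICON}
--     any_word = False
--     total = 0
--     for raw in text.split():
--         w = raw.strip(".,!?;:\"'()[]{}").lower()
--         if not w:
--             continue
--         any_word = True
--         e = _WORD_TO_EMOTION.get(w)
--         if e is not None:
--             counts[e] += 1
--             total += 1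
--     if not any_word or total == 0:
--         return "none"
--     return max(counts.items(), key=lambda x: x[1])[0]
-- ===== Notes on version B (the rewrite author's own statement) =====
-- stated objective: idiomatic
-- what changed: B precomputes a flat inverted word-to-emotion dict once and streams over the tokens in a single pass with one dict lookup per word, instead of A's two list-building passes plus a nested scan over all four lexica per word.
import Mathlib
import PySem

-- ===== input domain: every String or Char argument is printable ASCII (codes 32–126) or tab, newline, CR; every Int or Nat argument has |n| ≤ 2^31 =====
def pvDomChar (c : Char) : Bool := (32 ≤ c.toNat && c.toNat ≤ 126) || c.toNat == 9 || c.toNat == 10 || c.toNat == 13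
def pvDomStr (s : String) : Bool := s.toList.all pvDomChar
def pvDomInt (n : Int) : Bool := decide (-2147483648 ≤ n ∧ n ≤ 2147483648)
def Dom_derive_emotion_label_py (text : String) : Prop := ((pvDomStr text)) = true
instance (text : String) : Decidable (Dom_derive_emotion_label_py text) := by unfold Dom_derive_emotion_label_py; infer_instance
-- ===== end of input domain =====

-- B replaces A's nested scan over the four lexica by a single inverted word→emotion
-- dict built once, streaming over the tokens in one pass (objective: idiomatic).

-- ===== PORT A =====
def pvStripCs : String := ".,!?;:\"'()[]{}"

def pvLexicon : List (String × PySem.Set String) :=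
  [("anxiety", PySem.Set.ofList ["anxiety","anxious","panic","nervous","worried","fear"]),
   ("burnout", PySem.Set.ofList ["burnout","burned","exhausted","drained","fatigued","tired"]),
   ("pressure", PySem.Set.ofList ["deadline","deadlines","pressure","burden","responsibility"]),
   ("distress", PySem.Set.ofList ["helpless","hopeless","trapped","breakdown","overwhelmed","stuck"])]

def derive_emotion_label_py (text : String) : String :=
  let words := (PySem.Str.split₀ text).map (fun w => PySem.Str.lower (PySem.Str.stripChars w pvStripCs))
  let words := words.filter (fun w => w ≠ "")
  if words = [] then "none"
  else
    let counts : PySem.Dict String Int := PySem.Dict.ofList (pvLexicon.map (fun p => (p.1, (0 : Int))))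
    let counts := words.foldl (fun c w =>
      pvLexicon.foldl (fun c p => if PySem.Set.contains p.2 w then c.modify p.1 0 (· + 1) else c) c) counts
    if counts.values.foldl (· + ·) 0 = 0 then "none"
    else
      match PySem.List.max? counts.items (fun x => x.2) with
      | some p => p.1
      | none => "none"

-- ===== PORT B =====
def pvWordToEmotion : PySem.Dict String String :=
  PySem.Dict.ofList (pvLexicon.flatMap (fun p => p.2.map (fun w => (w, p.1))))

def derive_emotion_label_py_alt (text : String) : String :=
  let init : PySem.Dict String Int := PySem.Dict.ofList (pvLexicon.map (fun p => (p.1, (0 : Int))))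
  let st := (PySem.Str.split₀ text).foldl
    (fun (st : PySem.Dict String Int × Bool × Int) raw =>
      let w := PySem.Str.lower (PySem.Str.stripChars raw pvStripCs)
      if w = "" then st
      else
        match pvWordToEmotion.get? w with
        | some e => (st.1.modify e 0 (· + 1), true, st.2.2 + 1)
        | none => (st.1, true, st.2.2))
    (init, false, (0 : Int))
  if st.2.1 = false ∨ st.2.2 = 0 then "none"
  else
    match PySem.List.max? st.1.items (fun x => x.2) with
    | some p => p.1
    | none => "none"

-- ===== PRECONDITION & SPEC =====
def Spec_derive_emotion_label_py (text : String) (out : String) : Prop := out = derive_emotion_label_py_alt text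
instance (text : String) (out : String) : Decidable (Spec_derive_emotion_label_py text out) := by unfold Spec_derive_emotion_label_py; infer_instance

-- ===== CLAIM (what is proved, stated in full; the proofs are below) =====
def Claim_equal_derive_emotion_label_py : Prop := ∀ (text : String), Dom_derive_emotion_label_py text → Spec_derive_emotion_label_py text (derive_emotion_label_py text)

-- ===== LEMMAS AND PROOFS =====

-- step of A's inner loop (the scan over the four lexica)
def stepA (c : PySem.Dict String Int) (w : String) : PySem.Dict String Int :=
  pvLexicon.foldl (fun c p => if PySem.Set.contains p.2 w then c.modify p.1 0 (· + 1) else c) c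

-- step of B's dict update (a single inverted-index lookup)
def stepB (c : PySem.Dict String Int) (w : String) : PySem.Dict String Int :=
  match pvWordToEmotion.get? w with
  | some e => c.modify e 0 (· + 1)
  | none => c

-- step of B's whole loop state: (counts, any_word flag, total)
def stepT (st : PySem.Dict String Int × Bool × Int) (w : String) : PySem.Dict String Int × Bool × Int :=
  match pvWordToEmotion.get? w with
  | some e => (st.1.modify e 0 (· + 1), true, st.2.2 + 1)
  | none => (st.1, true, st.2.2)

-- the counts dict always has exactly the four emotion keys, in lexicon order
def mkC (a b p d : Int) : PySem.Dict String Int :=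
  PySem.Dict.mk [("anxiety", a), ("burnout", b), ("pressure", p), ("distress", d)]

theorem pvLexicon_lit : pvLexicon =
  [("anxiety", ["anxiety", "anxious", "panic", "nervous", "worried", "fear"]),
   ("burnout", ["burnout", "burned", "exhausted", "drained", "fatigued", "tired"]),
   ("pressure", ["deadline", "deadlines", "pressure", "burden", "responsibility"]),
   ("distress", ["helpless", "hopeless", "trapped", "breakdown", "overwhelmed", "stuck"])] := rfl

theorem pvWordToEmotion_lit : pvWordToEmotion = PySem.Dict.mk [("anxiety", "anxiety"), ("anxious", "anxiety"), ("panic", "anxiety"), ("nervous", "anxiety"), ("worried", "anxiety"), ("fear", "anxiety"), ("burnout", "burnout"), ("burned", "burnout"), ("exhausted", "burnout"), ("drained", "burnout"), ("fatigued", "burnout"), ("tired", "burnout"), ("deadline", "pressure"), ("deadlines", "pressure"), ("pressure", "pressure"), ("burden", "pressure"), ("responsibility", "pressure"), ("helpless", "distress"), ("hopeless", "distress"), ("trapped", "distress"), ("breakdown", "distress"), ("overwhelmed", "distress"), ("stuck", "distress")] := rfl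

theorem init_lit : (PySem.Dict.ofList (pvLexicon.map (fun p => (p.1, (0 : Int))))) = mkC 0 0 0 0 := rfl

theorem mod_anx (a b p d : Int) : (mkC a b p d).modify "anxiety" 0 (· + 1) = mkC (a + 1) b p d := rfl
theorem mod_bur (a b p d : Int) : (mkC a b p d).modify "burnout" 0 (· + 1) = mkC a (b + 1) p d := rfl
theorem mod_pre (a b p d : Int) : (mkC a b p d).modify "pressure" 0 (· + 1) = mkC a b (p + 1) d := rfl
theorem mod_dis (a b p d : Int) : (mkC a b p d).modify "distress" 0 (· + 1) = mkC a b p (d + 1) := rfl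

-- one inverted-index lookup decides A's whole scan over the four lexica
theorem step_eq (c : PySem.Dict String Int) (w : String) : stepA c w = stepB c w := by
  rcases eq_or_ne w "anxiety" with rfl | h0
  · rfl
  rcases eq_or_ne w "anxious" with rfl | h1
  · rfl
  rcases eq_or_ne w "panic" with rfl | h2
  · rfl
  rcases eq_or_ne w "nervous" with rfl | h3
  · rfl
  rcases eq_or_ne w "worried" with rfl | h4
  · rfl
  rcases eq_or_ne w "fear" with rfl | h5
  · rfl
  rcases eq_or_ne w "burnout" with rfl | h6
  · rfl
  rcases eq_or_ne w "burned" with rfl | h7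
  · rfl
  rcases eq_or_ne w "exhausted" with rfl | h8
  · rfl
  rcases eq_or_ne w "drained" with rfl | h9
  · rfl
  rcases eq_or_ne w "fatigued" with rfl | h10
  · rfl
  rcases eq_or_ne w "tired" with rfl | h11
  · rfl
  rcases eq_or_ne w "deadline" with rfl | h12
  · rfl
  rcases eq_or_ne w "deadlines" with rfl | h13
  · rfl
  rcases eq_or_ne w "pressure" with rfl | h14
  · rfl
  rcases eq_or_ne w "burden" with rfl | h15
  · rfl
  rcases eq_or_ne w "responsibility" with rfl | h16
  · rfl
  rcases eq_or_ne w "helpless" with rfl | h17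
  · rfl
  rcases eq_or_ne w "hopeless" with rfl | h18
  · rfl
  rcases eq_or_ne w "trapped" with rfl | h19
  · rfl
  rcases eq_or_ne w "breakdown" with rfl | h20
  · rfl
  rcases eq_or_ne w "overwhelmed" with rfl | h21
  · rfl
  rcases eq_or_ne w "stuck" with rfl | h22
  · rfl
  case _ =>
    have b0 : (w == "anxiety") = false := by simp [h0]
    have c0 : ("anxiety" == w) = false := by simp [Ne.symm h0]
    have b1 : (w == "anxious") = false := by simp [h1]
    have c1 : ("anxious" == w) = false := by simp [Ne.symm h1]
    have b2 : (w == "panic") = false := by simp [h2]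
    have c2 : ("panic" == w) = false := by simp [Ne.symm h2]
    have b3 : (w == "nervous") = false := by simp [h3]
    have c3 : ("nervous" == w) = false := by simp [Ne.symm h3]
    have b4 : (w == "worried") = false := by simp [h4]
    have c4 : ("worried" == w) = false := by simp [Ne.symm h4]
    have b5 : (w == "fear") = false := by simp [h5]
    have c5 : ("fear" == w) = false := by simp [Ne.symm h5]
    have b6 : (w == "burnout") = false := by simp [h6]
    have c6 : ("burnout" == w) = false := by simp [Ne.symm h6]
    have b7 : (w == "burned") = false := by simp [h7]
    have c7 : ("burned" == w) = false := by simp [Ne.symm h7]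
    have b8 : (w == "exhausted") = false := by simp [h8]
    have c8 : ("exhausted" == w) = false := by simp [Ne.symm h8]
    have b9 : (w == "drained") = false := by simp [h9]
    have c9 : ("drained" == w) = false := by simp [Ne.symm h9]
    have b10 : (w == "fatigued") = false := by simp [h10]
    have c10 : ("fatigued" == w) = false := by simp [Ne.symm h10]
    have b11 : (w == "tired") = false := by simp [h11]
    have c11 : ("tired" == w) = false := by simp [Ne.symm h11]
    have b12 : (w == "deadline") = false := by simp [h12]
    have c12 : ("deadline" == w) = false := by simp [Ne.symm h12]
    have b13 : (w == "deadlines") = false := by simp [h13]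
    have c13 : ("deadlines" == w) = false := by simp [Ne.symm h13]
    have b14 : (w == "pressure") = false := by simp [h14]
    have c14 : ("pressure" == w) = false := by simp [Ne.symm h14]
    have b15 : (w == "burden") = false := by simp [h15]
    have c15 : ("burden" == w) = false := by simp [Ne.symm h15]
    have b16 : (w == "responsibility") = false := by simp [h16]
    have c16 : ("responsibility" == w) = false := by simp [Ne.symm h16]
    have b17 : (w == "helpless") = false := by simp [h17]
    have c17 : ("helpless" == w) = false := by simp [Ne.symm h17]
    have b18 : (w == "hopeless") = false := by simp [h18]
    have c18 : ("hopeless" == w) = false := by simp [Ne.symm h18]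
    have b19 : (w == "trapped") = false := by simp [h19]
    have c19 : ("trapped" == w) = false := by simp [Ne.symm h19]
    have b20 : (w == "breakdown") = false := by simp [h20]
    have c20 : ("breakdown" == w) = false := by simp [Ne.symm h20]
    have b21 : (w == "overwhelmed") = false := by simp [h21]
    have c21 : ("overwhelmed" == w) = false := by simp [Ne.symm h21]
    have b22 : (w == "stuck") = false := by simp [h22]
    have c22 : ("stuck" == w) = false := by simp [Ne.symm h22]
    simp only [stepA, stepB, pvLexicon_lit, pvWordToEmotion_lit, PySem.Dict.get?, PySem.Dict.items,
      PySem.Set.contains, List.contains_cons, List.contains_nil, List.find?, List.foldl_cons,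
      List.foldl_nil, b0, b1, b2, b3, b4, b5, b6, b7, b8, b9, b10, b11, b12, b13, b14, b15, b16, b17, b18, b19, b20, b21, b22, c0, c1, c2, c3, c4, c5, c6, c7, c8, c9, c10, c11, c12, c13, c14, c15, c16, c17, c18, c19, c20, c21, c22, Bool.or_false, Bool.false_or, Option.map_none, if_false,
      Bool.false_eq_true, ite_false]

theorem get?_cases (w e : String) (h : pvWordToEmotion.get? w = some e) :
    e = "anxiety" ∨ e = "burnout" ∨ e = "pressure" ∨ e = "distress" := by
  rw [pvWordToEmotion_lit] at h
  obtain ⟨q, hq, hqe⟩ : ∃ q, List.find? (fun q => q.1 == w)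
      (PySem.Dict.mk [("anxiety", "anxiety"), ("anxious", "anxiety"), ("panic", "anxiety"), ("nervous", "anxiety"), ("worried", "anxiety"), ("fear", "anxiety"), ("burnout", "burnout"), ("burned", "burnout"), ("exhausted", "burnout"), ("drained", "burnout"), ("fatigued", "burnout"), ("tired", "burnout"), ("deadline", "pressure"), ("deadlines", "pressure"), ("pressure", "pressure"), ("burden", "pressure"), ("responsibility", "pressure"), ("helpless", "distress"), ("hopeless", "distress"), ("trapped", "distress"), ("breakdown", "distress"), ("overwhelmed", "distress"), ("stuck", "distress")]).items = some q ∧ q.2 = e := by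
    simpa [PySem.Dict.get?] using h
  have hm := List.mem_of_find?_eq_some hq
  subst hqe
  simp only [PySem.Dict.items, List.mem_cons, List.not_mem_nil, or_false] at hm
  rcases hm with rfl|rfl|rfl|rfl|rfl|rfl|rfl|rfl|rfl|rfl|rfl|rfl|rfl|rfl|rfl|rfl|rfl|rfl|rfl|rfl|rfl|rfl|rfl <;> simp

-- B's stream over the raw tokens is the fold of stepT over the cleaned word list
theorem foldB_norm (l : List String) (s : PySem.Dict String Int × Bool × Int) :
    l.foldl (fun st raw =>
      let w := PySem.Str.lower (PySem.Str.stripChars raw pvStripCs)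
      if w = "" then st
      else
        match pvWordToEmotion.get? w with
        | some e => (st.1.modify e 0 (· + 1), true, st.2.2 + 1)
        | none => (st.1, true, st.2.2)) s
    = (((l.map (fun w => PySem.Str.lower (PySem.Str.stripChars w pvStripCs))).filter
        (fun w => w ≠ "")).foldl stepT s) := by
  induction l generalizing s with
  | nil => simp only [List.foldl_nil, List.map_nil, List.filter_nil]
  | cons a t ih =>
    simp only [List.foldl_cons, List.map_cons, List.filter_cons]
    by_cases h : PySem.Str.lower (PySem.Str.stripChars a pvStripCs) = ""
    · simp [h, ih]
    · simp [h, ih, stepT]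

-- loop invariant: counts has the four keys, total = their sum, flag = "saw a word"
theorem foldT_spec (ws : List String) : ∀ (a b p d t : Int) (flag : Bool), t = a + b + p + d →
    ∃ a' b' p' d', ws.foldl stepT (mkC a b p d, flag, t)
        = (mkC a' b' p' d', flag || !ws.isEmpty, a' + b' + p' + d')
      ∧ ws.foldl stepB (mkC a b p d) = mkC a' b' p' d' := by
  induction ws with
  | nil =>
    intro a b p d t flag ht
    exact ⟨a, b, p, d, by simp [ht], rfl⟩
  | cons w tail ih =>
    intro a b p d t flag ht
    rcases hg : pvWordToEmotion.get? w with _ | e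
    · obtain ⟨a', b', p', d', h1, h2⟩ := ih a b p d t true ht
      refine ⟨a', b', p', d', ?_, ?_⟩
      · simp only [List.foldl_cons, stepT, hg, h1, Bool.true_or, List.isEmpty_cons,
          Bool.not_false, Bool.or_true]
      · simp only [List.foldl_cons, stepB, hg, h2]
    · rcases get?_cases w e hg with rfl | rfl | rfl | rfl
      · obtain ⟨a', b', p', d', h1, h2⟩ := ih (a + 1) b p d (t + 1) true (by omega)
        refine ⟨a', b', p', d', ?_, ?_⟩
        · simp only [List.foldl_cons, stepT, hg, mod_anx, h1, Bool.true_or, List.isEmpty_cons,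
            Bool.not_false, Bool.or_true]
        · simp only [List.foldl_cons, stepB, hg, mod_anx, h2]
      · obtain ⟨a', b', p', d', h1, h2⟩ := ih a (b + 1) p d (t + 1) true (by omega)
        refine ⟨a', b', p', d', ?_, ?_⟩
        · simp only [List.foldl_cons, stepT, hg, mod_bur, h1, Bool.true_or, List.isEmpty_cons,
            Bool.not_false, Bool.or_true]
        · simp only [List.foldl_cons, stepB, hg, mod_bur, h2]
      · obtain ⟨a', b', p', d', h1, h2⟩ := ih a b (p + 1) d (t + 1) true (by omega)
        refine ⟨a', b', p', d', ?_, ?_⟩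
        · simp only [List.foldl_cons, stepT, hg, mod_pre, h1, Bool.true_or, List.isEmpty_cons,
            Bool.not_false, Bool.or_true]
        · simp only [List.foldl_cons, stepB, hg, mod_pre, h2]
      · obtain ⟨a', b', p', d', h1, h2⟩ := ih a b p (d + 1) (t + 1) true (by omega)
        refine ⟨a', b', p', d', ?_, ?_⟩
        · simp only [List.foldl_cons, stepT, hg, mod_dis, h1, Bool.true_or, List.isEmpty_cons,
            Bool.not_false, Bool.or_true]
        · simp only [List.foldl_cons, stepB, hg, mod_dis, h2]

theorem foldAB (l : List String) : ∀ c, l.foldl stepA c = l.foldl stepB c := by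
  induction l with
  | nil => intro c; rfl
  | cons w t ih => intro c; simp only [List.foldl_cons, step_eq, ih]

theorem assemble (ws : List String) :
    (if ws = [] then "none"
     else
       let counts := mkC 0 0 0 0
       let counts := ws.foldl (fun c w =>
         pvLexicon.foldl (fun c p => if PySem.Set.contains p.2 w then c.modify p.1 0 (· + 1) else c) c) counts
       if counts.values.foldl (· + ·) 0 = 0 then "none"
       else
         match PySem.List.max? counts.items (fun x => x.2) with
         | some p => p.1
         | none => "none")
    = (let st := ws.foldl stepT (mkC 0 0 0 0, false, 0)
       if st.2.1 = false ∨ st.2.2 = 0 then "none"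
       else
         match PySem.List.max? st.1.items (fun x => x.2) with
         | some p => p.1
         | none => "none") := by
  obtain ⟨a, b, p, d, h1, h2⟩ := foldT_spec ws 0 0 0 0 0 false (by norm_num)
  have hAB : ws.foldl (fun c w =>
      pvLexicon.foldl (fun c p => if PySem.Set.contains p.2 w then c.modify p.1 0 (· + 1) else c) c)
      (mkC 0 0 0 0) = ws.foldl stepB (mkC 0 0 0 0) := by
    have : (fun (c : PySem.Dict String Int) (w : String) =>
        pvLexicon.foldl (fun c p => if PySem.Set.contains p.2 w then c.modify p.1 0 (· + 1) else c) c)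
        = stepA := rfl
    rw [this]
    exact foldAB ws (mkC 0 0 0 0)
  cases ws with
  | nil => simp
  | cons w tl =>
    simp only [List.isEmpty_cons, Bool.not_false, Bool.or_true] at h1
    simp only [hAB, h2, h1]
    have hne : ¬ (w :: tl = []) := List.cons_ne_nil w tl
    have hv : (mkC a b p d).values.foldl (· + ·) 0 = 0 + a + b + p + d := rfl
    by_cases hz : a + b + p + d = 0
    · simp [hne, hv, hz]
    · simp [hne, hv, hz]

theorem assemble' (l : List String) :
    (let words := l.map (fun w => PySem.Str.lower (PySem.Str.stripChars w pvStripCs))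
     let words := words.filter (fun w => w ≠ "")
     if words = [] then "none"
     else
       let counts : PySem.Dict String Int := PySem.Dict.ofList (pvLexicon.map (fun p => (p.1, (0 : Int))))
       let counts := words.foldl (fun c w =>
         pvLexicon.foldl (fun c p => if PySem.Set.contains p.2 w then c.modify p.1 0 (· + 1) else c) c) counts
       if counts.values.foldl (· + ·) 0 = 0 then "none"
       else
         match PySem.List.max? counts.items (fun x => x.2) with
         | some p => p.1
         | none => "none")
    = (let init : PySem.Dict String Int := PySem.Dict.ofList (pvLexicon.map (fun p => (p.1, (0 : Int))))
       let st := l.foldl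
         (fun (st : PySem.Dict String Int × Bool × Int) raw =>
           let w := PySem.Str.lower (PySem.Str.stripChars raw pvStripCs)
           if w = "" then st
           else
             match pvWordToEmotion.get? w with
             | some e => (st.1.modify e 0 (· + 1), true, st.2.2 + 1)
             | none => (st.1, true, st.2.2))
         (init, false, (0 : Int))
       if st.2.1 = false ∨ st.2.2 = 0 then "none"
       else
         match PySem.List.max? st.1.items (fun x => x.2) with
         | some p => p.1
         | none => "none") := by
  have h := foldB_norm l (PySem.Dict.ofList (pvLexicon.map (fun p => (p.1, (0 : Int)))), false, (0 : Int))
  rw [init_lit] at h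
  exact (assemble _).trans (congrArg (fun st : PySem.Dict String Int × Bool × Int =>
    if st.2.1 = false ∨ st.2.2 = 0 then "none"
    else
      match PySem.List.max? st.1.items (fun x => x.2) with
      | some p => p.1
      | none => "none") h.symm)

-- ===== VERDICT (by name: the statement is the Claim_ definition above) =====
theorem derive_emotion_label_py_spec : Claim_equal_derive_emotion_label_py := by
  intro text _
  show derive_emotion_label_py text = derive_emotion_label_py_alt text
  exact assemble' (PySem.Str.split₀ text)
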